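-- pv_equiv track=rewrite | github.com/nkcs-iclab/linglong | linglong/tokenization_linglong.py | convert_tokens_to_string
-- ===== SOURCE A (Python) =====
-- import string
--
-- def convert_tokens_to_string(tokens: str | list[str]) -> str:
--     if isinstance(tokens, str):
--         tokens = [tokens]
--     whitespace_joined = ' '.join(tokens).replace(' ##', '').strip()
--
--     # Remove whitespaces between Chinese characters.
--     # TODO: This will remove whitespaces between some English words as well. Need fix.
--     alphabet_set = set(list(string.ascii_letters))
--     result = ''
--     for i in range(len(whitespace_joined)):
--         if whitespace_joined[i] == ' ' and whitespace_joined[i + 1] not in alphabet_set: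
--             continue
--         result += whitespace_joined[i]
--     return result
-- ===== SOURCE B (Python) =====
-- import string
--
-- def convert_tokens_to_string(tokens):
--     if isinstance(tokens, str):
--         tokens = [tokens]
--     s = ' '.join(tokens).replace(' ##', '').strip()
--     alpha = set(string.ascii_letters)
--     parts = s.split(' ')
--     out = parts[0]
--     for part in parts[1:]:
--         out += (' ' if part and part[0] in alpha else '') + part
--     return out
-- ===== Notes on version B (the rewrite author's own statement) =====
-- stated objective: faster
-- what changed: Replaces A's per-character index loop with lookahead over the joined string by a token-level algorithm: split the stripped string on spaces and rejoin the parts, inserting a space only before parts that start with an ASCII letter (constant-factor win: one set lookup per part instead of per character).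
import Mathlib
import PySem

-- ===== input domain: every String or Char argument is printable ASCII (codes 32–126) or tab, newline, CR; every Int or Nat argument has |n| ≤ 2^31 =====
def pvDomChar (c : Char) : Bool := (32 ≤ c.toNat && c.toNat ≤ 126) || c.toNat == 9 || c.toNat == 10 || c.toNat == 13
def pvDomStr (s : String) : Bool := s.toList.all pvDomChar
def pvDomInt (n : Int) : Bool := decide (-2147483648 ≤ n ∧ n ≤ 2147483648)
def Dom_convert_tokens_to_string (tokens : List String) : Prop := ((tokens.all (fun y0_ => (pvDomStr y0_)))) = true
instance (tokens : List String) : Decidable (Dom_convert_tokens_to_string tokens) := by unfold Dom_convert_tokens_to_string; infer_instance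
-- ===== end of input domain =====

-- B rejoins the space-split parts of the stripped string, adding a space only before parts
-- starting with an ASCII letter, instead of A's per-character index loop with lookahead.

-- string.ascii_letters
def asciiLetters : List Char := "abcdefghijklmnopqrstuvwxyzABCDEFGHIJKLMNOPQRSTUVWXYZ".toList

-- ===== PORT A =====
-- A's loop body: `if wj[i] == ' ' and wj[i+1] not in alphabet_set: continue; result += wj[i]`
def stepA (alphabetSet : PySem.Set Char) (wj result : List Char) (i : Int) : List Char :=
  match PySem.List.pyGet? wj i, PySem.List.pyGet? wj (i + 1) with
  | some c, some d =>
      if c == ' ' && !(PySem.Set.contains alphabetSet d) then result else result ++ [c]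
  | some c, none => result ++ [c]
      -- i is the last index: Python reaches wj[i+1] only when wj[i] = ' ', impossible after strip
  | none, _ => result

def convert_tokens_to_string (tokens : List String) : String :=
  let wj : List Char :=
    PySem.Chars.strip (PySem.Chars.replace (PySem.Chars.join [' '] (tokens.map String.toList)) [' ', '#', '#'] [])
  let alphabetSet : PySem.Set Char := PySem.Set.ofList asciiLetters
  let result : List Char :=
    (PySem.List.pyRange 0 (PySem.Chars.len wj) 1).foldl (stepA alphabetSet wj) []
  String.ofList result

-- ===== PORT B =====
-- `' ' if part and part[0] in alpha else ''`
def sepFor (alpha : PySem.Set Char) (part : List Char) : List Char :=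
  match part with
  | [] => []
  | c :: _ => if PySem.Set.contains alpha c then [' '] else []

def convert_tokens_to_string_alt (tokens : List String) : String :=
  let s : List Char :=
    PySem.Chars.strip (PySem.Chars.replace (PySem.Chars.join [' '] (tokens.map String.toList)) [' ', '#', '#'] [])
  let alpha : PySem.Set Char := PySem.Set.ofList asciiLetters
  match PySem.Chars.splitOn s [' '] with
  | [] => ""   -- unreachable: str.split always yields at least one part
  | p :: rest =>
      String.ofList (rest.foldl (fun out part => out ++ sepFor alpha part ++ part) p)

-- ===== PRECONDITION & SPEC =====
def Spec_convert_tokens_to_string (tokens : List String) (out : String) : Prop := out = convert_tokens_to_string_alt tokens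
instance (tokens : List String) (out : String) : Decidable (Spec_convert_tokens_to_string tokens out) := by unfold Spec_convert_tokens_to_string; infer_instance

-- ===== CLAIM (what is proved, stated in full; the proofs are below) =====
def Claim_equal_convert_tokens_to_string : Prop := ∀ (tokens : List String), Dom_convert_tokens_to_string tokens → Spec_convert_tokens_to_string tokens (convert_tokens_to_string tokens)

-- ===== LEMMAS AND PROOFS =====

-- A's loop, as a recursion over the remaining suffix with one-character lookahead
def fA : List Char → List Char
  | [] => []
  | c :: r =>
    (match r.head? with
     | some d => if c == ' ' && !(PySem.Set.contains (PySem.Set.ofList asciiLetters) d) then [] else [c]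
     | none => [c]) ++ fA r

-- s.split(' ') as (first part, remaining parts)
def splitSp : List Char → List Char × List (List Char)
  | [] => ([], [])
  | c :: r =>
    if c == ' ' then ([], (splitSp r).1 :: (splitSp r).2) else (c :: (splitSp r).1, (splitSp r).2)

theorem go_splitSp : ∀ (fuel : Nat) (l cur : List Char) (acc : List (List Char)), l.length < fuel →
    PySem.Chars.splitOn.go [' '] fuel l cur acc
      = acc.reverse ++ (cur.reverse ++ (splitSp l).1) :: (splitSp l).2 := by
  intro fuel
  induction fuel with
  | zero => intro l cur acc h; omega
  | succ n ih =>
    intro l cur acc h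
    match l with
    | [] =>
      rw [PySem.Chars.splitOn.go.eq_def]
      simp [splitSp]
    | c :: rest =>
      have hstep : PySem.Chars.splitOn.go [' '] (n + 1) (c :: rest) cur acc
          = if [' '].isPrefixOf (c :: rest) = true then
              PySem.Chars.splitOn.go [' '] n (List.drop 1 (c :: rest)) [] (cur.reverse :: acc)
            else PySem.Chars.splitOn.go [' '] n rest (c :: cur) acc := by
        rw [PySem.Chars.splitOn.go.eq_def]
        rfl
      rw [hstep]
      simp only [List.length_cons] at h
      by_cases hc : c = ' '
      · subst hc
        rw [if_pos (by simp [List.isPrefixOf]), List.drop_succ_cons, List.drop_zero,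
          ih rest [] (cur.reverse :: acc) (by omega)]
        simp [splitSp]
      · have hpre : ¬ ([' '].isPrefixOf (c :: rest) = true) := by
          simp [List.isPrefixOf]
          exact fun h' => hc h'.symm
        rw [if_neg hpre, ih rest (c :: cur) acc (by omega)]
        simp [splitSp, hc]

theorem splitOn_eq (l : List Char) :
    PySem.Chars.splitOn l [' '] = (splitSp l).1 :: (splitSp l).2 := by
  have := go_splitSp (l.length + 1) l [] [] (by omega)
  simpa [PySem.Chars.splitOn] using this

theorem foldlB (alpha : PySem.Set Char) (ps : List (List Char)) (p : List Char) :
    ps.foldl (fun out part => out ++ sepFor alpha part ++ part) p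
      = p ++ ps.flatMap (fun part => sepFor alpha part ++ part) := by
  induction ps generalizing p with
  | nil => simp
  | cons q qs ih => simp [List.append_assoc, List.flatMap]


theorem loopA : ∀ (suf pre acc : List Char),
    (PySem.List.pyRange (pre.length : Int) ((pre.length + suf.length : Nat) : Int) 1).foldl
      (stepA (PySem.Set.ofList asciiLetters) (pre ++ suf)) acc
      = acc ++ fA suf := by
  intro suf
  induction suf with
  | nil =>
    intro pre acc
    simp [PySem.List.pyRange, fA]
  | cons c r ih =>
    intro pre acc
    have hab : ((pre.length : Nat) : Int) < ((pre.length + (c :: r).length : Nat) : Int) := by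
      push_cast
      simp only [List.length_cons]
      omega
    rw [PySem.List.pyRange_one_cons hab, List.foldl_cons]
    have hget1 : PySem.List.pyGet? (pre ++ c :: r) (pre.length : Int) = some c := by
      rw [PySem.List.pyGet?_natCast]
      simp
    have hget2 : PySem.List.pyGet? (pre ++ c :: r) ((pre.length : Int) + 1) = r.head? := by
      have h1 : ((pre.length : Int) + 1) = ((pre.length + 1 : Nat) : Int) := by push_cast; ring
      rw [h1, PySem.List.pyGet?_natCast]
      rw [List.getElem?_append_right (by omega)]
      simp only [Nat.add_sub_cancel_left, List.getElem?_cons_succ]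
      cases r <;> rfl
    have hstep : stepA (PySem.Set.ofList asciiLetters) (pre ++ c :: r) acc (pre.length : Int)
        = acc ++ (match r.head? with
            | some d => if c == ' ' && !(PySem.Set.contains (PySem.Set.ofList asciiLetters) d) then [] else [c]
            | none => [c]) := by
      rw [stepA, hget1, hget2]
      cases hr : r.head? with
      | none => rfl
      | some d =>
        show (if (c == ' ' && !(PySem.Set.contains (PySem.Set.ofList asciiLetters) d)) = true then acc else acc ++ [c])
            = acc ++ (if (c == ' ' && !(PySem.Set.contains (PySem.Set.ofList asciiLetters) d)) = true then [] else [c])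
        split_ifs <;> simp
    rw [hstep]
    have h2 : ((pre.length : Int) + 1) = (((pre ++ [c]).length : Nat) : Int) := by
      simp
    have h3 : (((pre.length + (c :: r).length : Nat)) : Int) = (((pre ++ [c]).length + r.length : Nat) : Int) := by
      simp only [List.length_append, List.length_cons, List.length_nil]
      push_cast
      ring
    rw [h2, h3]
    have h4 : pre ++ c :: r = (pre ++ [c]) ++ r := by simp
    rw [h4, ih (pre ++ [c])]
    simp [fA, List.append_assoc]

theorem sep_head (d : Char) (r' : List Char) :
    sepFor (PySem.Set.ofList asciiLetters) (splitSp (d :: r')).1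
      = if PySem.Set.contains (PySem.Set.ofList asciiLetters) d then [' '] else [] := by
  by_cases hd : d = ' '
  · subst hd
    have hns : ' ' ∉ asciiLetters := by decide
    simp [splitSp, sepFor, hns]
  · simp [splitSp, hd, sepFor]

theorem main_eq : ∀ (L : List Char), L.getLast? ≠ some ' ' →
    fA L = (splitSp L).1
        ++ ((splitSp L).2).flatMap (fun part => sepFor (PySem.Set.ofList asciiLetters) part ++ part) := by
  intro L
  induction L with
  | nil => intro _; simp [fA, splitSp]
  | cons c r ih =>
    intro hL
    cases r with
    | nil =>
      have hc : ¬ c = ' ' := by simpa using hL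
      simp [fA, splitSp, hc]
    | cons d r' =>
      have hL' : (d :: r').getLast? ≠ some ' ' := by
        simpa [List.getLast?_cons_cons] using hL
      have ihh := ih hL'
      by_cases hc : c = ' '
      · subst hc
        have h5 : fA (' ' :: d :: r')
            = (if PySem.Set.contains (PySem.Set.ofList asciiLetters) d then [' '] else []) ++ fA (d :: r') := by
          cases hcd : PySem.Set.contains (PySem.Set.ofList asciiLetters) d <;>
            simp at hcd <;> simp [fA, hcd]
        have h6 : splitSp (' ' :: d :: r') = ([], (splitSp (d :: r')).1 :: (splitSp (d :: r')).2) := by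
          simp [splitSp]
        rw [h5, ihh, h6]
        simp [List.flatMap_cons, sep_head d r', List.append_assoc]
      · have h7 : fA (c :: d :: r') = [c] ++ fA (d :: r') := by
          simp [fA, hc]
        have h8 : splitSp (c :: d :: r') = (c :: (splitSp (d :: r')).1, (splitSp (d :: r')).2) := by
          simp [splitSp, hc]
        rw [h7, h8, ihh]
        simp

theorem head?_dropWhile_not (p : Char → Bool) (l : List Char) (a : Char)
    (h : (l.dropWhile p).head? = some a) : p a = false := by
  induction l with
  | nil => simp at h
  | cons b r ih =>
    by_cases hb : p b
    · rw [List.dropWhile_cons_of_pos hb] at h; exact ih h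
    · rw [List.dropWhile_cons_of_neg hb] at h
      simp only [List.head?_cons, Option.some.injEq] at h
      subst h; simpa using hb

theorem strip_no_trailing_space (s : List Char) :
    (PySem.Chars.strip s).getLast? ≠ some ' ' := by
  intro h
  unfold PySem.Chars.strip PySem.Chars.rstrip at h
  rw [List.getLast?_reverse] at h
  have := head?_dropWhile_not _ _ _ h
  simp [PySem.Chars.isspace] at this

-- ===== VERDICT (by name: the statement is the Claim_ definition above) =====
theorem convert_tokens_to_string_spec : Claim_equal_convert_tokens_to_string := by
  intro tokens _
  unfold Spec_convert_tokens_to_string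
  show convert_tokens_to_string tokens = convert_tokens_to_string_alt tokens
  simp only [convert_tokens_to_string, convert_tokens_to_string_alt]
  generalize hw : PySem.Chars.strip
      (PySem.Chars.replace (PySem.Chars.join [' '] (List.map String.toList tokens)) [' ', '#', '#'] []) = L
  have hL : L.getLast? ≠ some ' ' := hw ▸ strip_no_trailing_space _
  have h0 : (PySem.List.pyRange 0 (PySem.Chars.len L) 1).foldl
      (stepA (PySem.Set.ofList asciiLetters) L) [] = fA L := by
    have := loopA L [] []
    simpa [PySem.Chars.len] using this
  rw [h0, splitOn_eq L]
  simp only []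
  rw [foldlB]
  exact congrArg _ (main_eq L hL)
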